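-- pv_equiv track=rewrite | github.com/Isomorfismo/Z4_Game | z4.py | vec_mul_mat_mod4
-- ===== SOURCE A (Python) =====
-- MOD = 4
--
-- def vec_mul_mat_mod4(v, M):
--     n = len(v)
--     out = [0]*n
--     for j in range(n):
--         s = 0
--         for i in range(n):
--             s += v[i]*M[i][j]
--         out[j] = s % MOD
--     return out
-- ===== SOURCE B (Python) =====
-- MOD = 4
--
-- def vec_mul_mat_mod4(v, M):
--     # Residue-class bucketing: since the result is taken mod 4, only v[i] % 4
--     # matters.  Sum the matrix rows into MOD buckets keyed by v[i] % 4 (one pass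
--     # over the rows, skipping residue 0), then combine the three nonzero-residue
--     # bucket vectors as 1*b1 + 2*b2 + 3*b3 mod 4.
--     n = len(v)
--     buckets = [[0] * n for _ in range(MOD)]
--     for i in range(n):
--         r = v[i] % MOD
--         if r:
--             b = buckets[r]
--             row = M[i]
--             for j in range(n):
--                 b[j] += row[j]
--     return [(buckets[1][j] + 2 * buckets[2][j] + 3 * buckets[3][j]) % MOD
--             for j in range(n)]
-- ===== Notes on version B (the rewrite author's own statement) =====
-- stated objective: alternative
-- what changed: B exploits the mod-4 codomain: instead of computing each output entry as a dot product of v with a matrix column, it buckets the matrix rows by the residue v[i] % 4 (rows with residue 0 are skipped entirely), sums the rows within each bucket, and forms the output as the fixed linear combination b1 + 2*b2 + 3*b3 of the three bucket vectors mod 4 - correct because v[i]*M[i][j] is congruent to (v[i]%4)*M[i][j] mod 4.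
import Mathlib
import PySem

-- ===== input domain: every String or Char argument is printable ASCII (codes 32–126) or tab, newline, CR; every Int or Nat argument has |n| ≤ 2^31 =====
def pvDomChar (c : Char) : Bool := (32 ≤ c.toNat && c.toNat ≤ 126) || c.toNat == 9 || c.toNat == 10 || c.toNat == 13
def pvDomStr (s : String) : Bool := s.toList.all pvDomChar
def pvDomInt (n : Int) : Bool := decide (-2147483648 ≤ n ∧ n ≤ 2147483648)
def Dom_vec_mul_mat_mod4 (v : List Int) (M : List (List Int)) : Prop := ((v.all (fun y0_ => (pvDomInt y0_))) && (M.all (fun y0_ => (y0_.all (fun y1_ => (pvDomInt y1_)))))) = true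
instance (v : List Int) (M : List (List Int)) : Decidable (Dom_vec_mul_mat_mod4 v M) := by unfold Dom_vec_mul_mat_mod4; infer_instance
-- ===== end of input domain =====

-- B buckets the matrix rows by the residue v[i] % 4 (skipping residue 0), sums rows
-- per bucket, and outputs (b1 + 2*b2 + 3*b3) % 4 instead of per-column dot products.

-- ===== PORT A =====
def vec_mul_mat_mod4 (v : List Int) (M : List (List Int)) : List Int :=
  -- n = len(v); locals n, s inlined
  (PySem.List.pyRange 0 (v.length : Int) 1).foldl (fun out j =>
    out.set j.toNat (PySem.Int.mod
      ((PySem.List.pyRange 0 (v.length : Int) 1).foldl (fun s i =>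
        s + PySem.List.pyGetD v i 0 * PySem.List.pyGetD (PySem.List.pyGetD M i []) j 0) 0) 4))
    (List.replicate v.length 0)

-- ===== PORT B =====
def vec_mul_mat_mod4_alt (v : List Int) (M : List (List Int)) : List Int :=
  -- n = len(v); buckets = [[0]*n for _ in range(MOD)]
  let n := v.length
  let buckets : List (List Int) :=
    (PySem.List.pyRange 0 4 1).map (fun _ => List.replicate n (0 : Int))
  -- for i in range(n): r = v[i] % MOD; if r: b = buckets[r]; row = M[i]; for j: b[j] += row[j]
  let buckets :=
    (PySem.List.pyRange 0 (n : Int) 1).foldl (fun bk i =>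
      let r := PySem.Int.mod (PySem.List.pyGetD v i 0) 4
      if r ≠ 0 then
        let b := PySem.List.pyGetD bk r []
        let row := PySem.List.pyGetD M i []
        bk.set r.toNat
          ((PySem.List.pyRange 0 (n : Int) 1).foldl (fun b j =>
            b.set j.toNat (PySem.List.pyGetD b j 0 + PySem.List.pyGetD row j 0)) b)
      else bk) buckets
  -- [(buckets[1][j] + 2*buckets[2][j] + 3*buckets[3][j]) % MOD for j in range(n)]
  (PySem.List.pyRange 0 (n : Int) 1).map (fun j =>
    PySem.Int.mod (PySem.List.pyGetD (PySem.List.pyGetD buckets 1 []) j 0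
      + 2 * PySem.List.pyGetD (PySem.List.pyGetD buckets 2 []) j 0
      + 3 * PySem.List.pyGetD (PySem.List.pyGetD buckets 3 []) j 0) 4)

-- ===== PRECONDITION & SPEC =====
-- Pre_ excludes exactly the inputs where Python A raises IndexError: it reads M[i][j]
-- for all i, j < len(v), so M and each of its first len(v) rows must have length ≥ len(v).
def Pre_vec_mul_mat_mod4 (v : List Int) (M : List (List Int)) : Prop :=
  v.length ≤ M.length ∧ ∀ row ∈ M.take v.length, v.length ≤ row.length
instance (v : List Int) (M : List (List Int)) : Decidable (Pre_vec_mul_mat_mod4 v M) := by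
  unfold Pre_vec_mul_mat_mod4; infer_instance

def pvWitness_vec_mul_mat_mod4 : List Int × List (List Int) :=
  ([1, 2], [[1, 3], [2, 1]])

def Spec_vec_mul_mat_mod4 (v : List Int) (M : List (List Int)) (out : List Int) : Prop := out = vec_mul_mat_mod4_alt v M
instance (v : List Int) (M : List (List Int)) (out : List Int) : Decidable (Spec_vec_mul_mat_mod4 v M out) := by unfold Spec_vec_mul_mat_mod4; infer_instance

-- ===== CLAIM (what is proved, stated in full; the proofs are below) =====
def Claim_equal_vec_mul_mat_mod4 : Prop := ∀ (v : List Int) (M : List (List Int)), Dom_vec_mul_mat_mod4 v M → Pre_vec_mul_mat_mod4 v M → Spec_vec_mul_mat_mod4 v M (vec_mul_mat_mod4 v M)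

-- ===== LEMMAS AND PROOFS =====

-- the entries both programs combine
def pvVi (v : List Int) (i : Nat) : Int := v.getD i 0
def pvM (M : List (List Int)) (i j : Nat) : Int := (M.getD i []).getD j 0
-- A's column-j dot product over the first k rows
def pvS (v : List Int) (M : List (List Int)) (k j : Nat) : Int :=
  ((List.range k).map (fun i => pvVi v i * pvM M i j)).sum
-- B's bucket r, entry j, after the first k rows
def pvB (v : List Int) (M : List (List Int)) (r k j : Nat) : Int :=
  ((List.range k).map (fun i =>
    if pvVi v i % 4 = (r : Int) ∧ r ≠ 0 then pvM M i j else 0)).sum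

theorem foldl_set_range (g : Nat → Int) :
    ∀ (n : Nat) (out : List Int), n ≤ out.length →
    (List.range n).foldl (fun o k => o.set k (g k)) out
      = (List.range n).map g ++ out.drop n := by
  intro n
  induction n with
  | zero => simp
  | succ m ih =>
    intro out hlen
    rw [List.range_succ, List.foldl_append, ih out (by omega)]
    simp only [List.foldl_cons, List.foldl_nil, List.set_append, List.length_map,
      List.length_range, lt_irrefl, if_false, Nat.sub_self]
    rw [List.map_append, List.append_assoc, List.drop_eq_getElem_cons (show m < out.length by omega), List.set_cons_zero]
    simp

theorem foldl_addset_range (c : Nat → Int) :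
    ∀ (n : Nat) (out : List Int), n ≤ out.length →
    (List.range n).foldl (fun o k => o.set k (PySem.List.pyGetD o (k : Int) 0 + c k)) out
      = (List.range n).map (fun k => out.getD k 0 + c k) ++ out.drop n := by
  intro n
  induction n with
  | zero => simp
  | succ m ih =>
    intro out hlen
    rw [List.range_succ, List.foldl_append, ih out (by omega)]
    simp only [List.foldl_cons, List.foldl_nil, PySem.List.pyGetD_natCast]
    have hget : ((List.range m).map (fun k => out.getD k 0 + c k) ++ out.drop m).getD m 0
        = out.getD m 0 := by
      rw [List.getD_eq_getElem?_getD, List.getElem?_append_right (by simp)]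
      simp only [List.length_map, List.length_range, Nat.sub_self]
      rw [List.getD_eq_getElem?_getD]
      simp [List.getElem?_drop]
    rw [hget, List.set_append]
    simp only [List.length_map, List.length_range, lt_irrefl, if_false, Nat.sub_self]
    rw [List.map_append, List.append_assoc, List.drop_eq_getElem_cons (show m < out.length by omega), List.set_cons_zero]
    simp

theorem vec_mul_mat_mod4_eq (v : List Int) (M : List (List Int)) :
    vec_mul_mat_mod4 v M
      = (List.range v.length).map (fun j => PySem.Int.mod (pvS v M v.length j) 4) := by
  unfold vec_mul_mat_mod4
  rw [PySem.List.pyRange_zero_nat, List.foldl_map]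
  rw [List.foldl_ext _ (fun (o : List Int) (k : Nat) => o.set k (PySem.Int.mod (pvS v M v.length k) 4))
    (List.replicate v.length 0) ?_]
  · rw [foldl_set_range _ v.length (List.replicate v.length 0) (by simp)]
    simp
  · intro out j _
    simp only [Int.toNat_natCast]
    congr 2
    rw [List.foldl_map]
    rw [List.foldl_ext _ (fun (s : Int) (i : Nat) => s + pvVi v i * pvM M i j) 0 ?_]
    · rw [PySem.List.foldl_add]
      simp [pvS]
    · intro s i _
      simp [pvVi, pvM, PySem.List.pyGetD_natCast]

-- one step of B's outer loop, when the residue is 0: nothing changes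
theorem pvB_step_zero (v : List Int) (M : List (List Int)) (m : Nat)
    (hz : pvVi v m % 4 = 0) (r j : Nat) :
    pvB v M r (m + 1) j = pvB v M r m j := by
  simp only [pvB, List.range_succ, List.map_append, List.sum_append,
    List.map_cons, List.map_nil, List.sum_cons, List.sum_nil]
  have : ¬ (pvVi v m % 4 = (r : Int) ∧ r ≠ 0) := by
    rintro ⟨h1, h2⟩
    rw [hz] at h1
    exact h2 (by exact_mod_cast h1.symm)
  rw [if_neg this]
  ring

-- one step of B's outer loop, nonzero residue ρ: only bucket ρ gains row m
theorem pvB_step_hit (v : List Int) (M : List (List Int)) (m : Nat)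
    (ρ : Int) (hρ : ρ = pvVi v m % 4) (hz : ρ ≠ 0) (j : Nat) :
    pvB v M ρ.toNat (m + 1) j = pvB v M ρ.toNat m j + pvM M m j := by
  have h0 : 0 ≤ ρ := hρ ▸ Int.emod_nonneg _ (by norm_num)
  simp only [pvB, List.range_succ, List.map_append, List.sum_append,
    List.map_cons, List.map_nil, List.sum_cons, List.sum_nil]
  rw [if_pos ⟨by rw [Int.toNat_of_nonneg h0, hρ], by omega⟩]
  ring

theorem pvB_step_miss (v : List Int) (M : List (List Int)) (m : Nat)
    (ρ : Int) (hρ : ρ = pvVi v m % 4) (r : Nat) (hr : (r : Int) ≠ ρ) (j : Nat) :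
    pvB v M r (m + 1) j = pvB v M r m j := by
  simp only [pvB, List.range_succ, List.map_append, List.sum_append,
    List.map_cons, List.map_nil, List.sum_cons, List.sum_nil]
  have : ¬ (pvVi v m % 4 = (r : Int) ∧ r ≠ 0) := by
    rintro ⟨h1, _⟩
    exact hr (by rw [← h1, ← hρ])
  rw [if_neg this]
  ring

-- B's outer loop invariant: after k rows the buckets hold the per-residue row sums
theorem alt_outer_loop (v : List Int) (M : List (List Int)) :
    ∀ (k : Nat),
    (List.range k).foldl (fun bk i =>
      let r := PySem.Int.mod (pvVi v i) 4
      if r ≠ 0 then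
        bk.set r.toNat
          ((List.range v.length).foldl (fun b j =>
            b.set j (PySem.List.pyGetD b (j : Int) 0 + pvM M i j))
            (PySem.List.pyGetD bk r []))
      else bk)
      ((List.range 4).map (fun _ => List.replicate v.length (0 : Int)))
      = (List.range 4).map (fun r => (List.range v.length).map (fun j => pvB v M r k j)) := by
  intro k
  induction k with
  | zero =>
    refine List.map_congr_left (fun r _ => ?_)
    simp [pvB, List.map_const', eq_comm]
  | succ m ih =>
    rw [show List.range (m+1) = List.range m ++ [m] from List.range_succ,
      List.foldl_append, List.foldl_cons, List.foldl_nil, ih]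
    simp only
    have hρ' : PySem.Int.mod (pvVi v m) 4 = pvVi v m % 4 :=
      PySem.Int.mod_eq_emod_of_pos (by norm_num)
    set ρ : Int := pvVi v m % 4 with hρdef
    rw [hρ']
    have h0 : 0 ≤ ρ := Int.emod_nonneg _ (by norm_num)
    have h4 : ρ < 4 := Int.emod_lt_of_pos _ (by norm_num)
    by_cases hz : ρ = 0
    · rw [if_neg (by simpa using hz)]
      refine List.map_congr_left (fun r _ => List.map_congr_left (fun j _ => ?_))
      exact (pvB_step_zero v M m (hρdef ▸ hz) r j).symm
    · rw [if_pos hz]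
      -- buckets[ρ] = the ρ-th map entry
      rw [PySem.List.pyGetD_eq_getElem _ _ h0 (by simpa using h4)]
      rw [List.getElem_map, List.getElem_range]
      -- the inner loop adds row m into it
      rw [foldl_addset_range (fun j => pvM M m j) v.length _ (by simp)]
      rw [List.drop_eq_nil_of_le (by simp), List.append_nil]
      -- compare entry by entry
      refine List.ext_getElem (by simp) (fun r h1 h2 => ?_)
      simp only [List.length_map, List.length_range] at h1 h2
      rw [List.getElem_set]
      simp only [List.getElem_map, List.getElem_range]
      by_cases hr : ρ.toNat = r
      · rw [if_pos hr]
        subst hr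
        refine List.map_congr_left (fun j hj => ?_)
        rw [PySem.List.getD_map_range _ _ _ _ (by simpa using hj)]
        exact (pvB_step_hit v M m ρ hρdef hz j).symm
      · rw [if_neg hr]
        refine List.map_congr_left (fun j _ => ?_)
        refine (pvB_step_miss v M m ρ hρdef r (fun hc => hr ?_) j).symm
        omega

theorem vec_mul_mat_mod4_alt_eq (v : List Int) (M : List (List Int)) :
    vec_mul_mat_mod4_alt v M
      = (List.range v.length).map (fun j =>
          PySem.Int.mod (pvB v M 1 v.length j + 2 * pvB v M 2 v.length j + 3 * pvB v M 3 v.length j) 4) := by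
  simp only [vec_mul_mat_mod4_alt]
  rw [show (PySem.List.pyRange 0 4 1).map (fun _ => List.replicate v.length (0:Int))
        = (List.range 4).map (fun _ => List.replicate v.length (0:Int)) from by
      rw [show PySem.List.pyRange 0 4 1 = [0,1,2,3] from by decide,
          show List.range 4 = [0,1,2,3] from by decide]
      rfl]
  rw [PySem.List.pyRange_zero_nat, List.foldl_map]
  rw [List.foldl_ext _ (fun bk (i : Nat) =>
      let r := PySem.Int.mod (pvVi v i) 4
      if r ≠ 0 then
        bk.set r.toNat
          ((List.range v.length).foldl (fun b j =>
            b.set j (PySem.List.pyGetD b (j : Int) 0 + pvM M i j))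
            (PySem.List.pyGetD bk r []))
      else bk) _ ?_]
  · rw [alt_outer_loop v M v.length, List.map_map]
    refine List.map_congr_left (fun j hj => ?_)
    have hj' : j < v.length := by simpa using hj
    have hget : ∀ r : Nat, r < 4 →
        PySem.List.pyGetD
          ((List.range 4).map (fun r => (List.range v.length).map (fun j => pvB v M r v.length j)))
          (r : Int) []
          = (List.range v.length).map (fun j => pvB v M r v.length j) := by
      intro r hr
      rw [PySem.List.pyGetD_eq_getElem _ _ (by positivity) (by simpa using hr)]
      simp
    have h1 := hget 1 (by norm_num); have h2 := hget 2 (by norm_num); have h3 := hget 3 (by norm_num)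
    push_cast at h1 h2 h3
    simp only [Function.comp, h1, h2, h3, PySem.List.pyGetD_natCast]
    rw [PySem.List.getD_map_range _ _ _ _ hj', PySem.List.getD_map_range _ _ _ _ hj',
        PySem.List.getD_map_range _ _ _ _ hj']
  · intro bk i _
    simp only [PySem.List.pyGetD_natCast]
    have hvi : v.getD i 0 = pvVi v i := rfl
    rw [hvi]
    by_cases hz : PySem.Int.mod (pvVi v i) 4 ≠ 0
    · simp only [if_pos hz]
      congr 1
      rw [List.foldl_map]
      refine List.foldl_ext _ _ _ (fun b j _ => ?_)
      simp only [Int.toNat_natCast, PySem.List.pyGetD_natCast]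
      rfl
    · simp only [if_neg hz]

-- the arithmetic bridge: mod 4, the dot product equals the bucket combination
theorem sum_res_modeq (v : List Int) (M : List (List Int)) (j : Nat) (l : List Nat) :
    ((l.map (fun i => pvVi v i * pvM M i j)).sum) % 4
      = ((l.map (fun i => (pvVi v i % 4) * pvM M i j)).sum) % 4 := by
  induction l with
  | nil => rfl
  | cons a t ih =>
    simp only [List.map_cons, List.sum_cons]
    have h1 : pvVi v a ≡ pvVi v a % 4 [ZMOD 4] := (Int.emod_emod_of_dvd _ dvd_rfl).symm
    exact (h1.mul_right _).add ih

theorem res_cases (x : Int) : x % 4 = 0 ∨ x % 4 = 1 ∨ x % 4 = 2 ∨ x % 4 = 3 := by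
  have h1 := Int.emod_nonneg x (by norm_num : (4:Int) ≠ 0)
  have h2 := Int.emod_lt_of_pos x (by norm_num : (0:Int) < 4)
  omega

theorem split_eq (v : List Int) (M : List (List Int)) (j : Nat) :
    ∀ (k : Nat),
    pvB v M 1 k j + 2 * pvB v M 2 k j + 3 * pvB v M 3 k j
      = ((List.range k).map (fun i => (pvVi v i % 4) * pvM M i j)).sum := by
  intro k
  induction k with
  | zero => simp [pvB]
  | succ m ih =>
    simp only [pvB, List.range_succ, List.map_append, List.sum_append,
      List.map_cons, List.map_nil, List.sum_cons, List.sum_nil] at *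
    have hc : (if pvVi v m % 4 = ((1:Nat) : Int) ∧ (1:Nat) ≠ 0 then pvM M m j else 0)
        + 2 * (if pvVi v m % 4 = ((2:Nat) : Int) ∧ (2:Nat) ≠ 0 then pvM M m j else 0)
        + 3 * (if pvVi v m % 4 = ((3:Nat) : Int) ∧ (3:Nat) ≠ 0 then pvM M m j else 0)
        = (pvVi v m % 4) * pvM M m j := by
      rcases res_cases (pvVi v m) with h | h | h | h <;> rw [h] <;> norm_num
    push_cast at ih hc ⊢
    linarith [ih, hc]

theorem bridge (v : List Int) (M : List (List Int)) (j : Nat) :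
    PySem.Int.mod (pvS v M v.length j) 4
      = PySem.Int.mod (pvB v M 1 v.length j + 2 * pvB v M 2 v.length j + 3 * pvB v M 3 v.length j) 4 := by
  simp only [PySem.Int.mod_eq_emod_of_pos (show (0:Int) < 4 by norm_num)]
  rw [split_eq, pvS, sum_res_modeq]

-- ===== VERDICT (by name: the statement is the Claim_ definition above) =====
theorem vec_mul_mat_mod4_spec : Claim_equal_vec_mul_mat_mod4 := by
  intro v M _ _
  unfold Spec_vec_mul_mat_mod4
  rw [vec_mul_mat_mod4_eq, vec_mul_mat_mod4_alt_eq]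
  exact List.map_congr_left (fun j _ => bridge v M j)
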